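-- pv_equiv track=rewrite | github.com/boris-pavel/python-apps | word_game/ps3.py | update_hand
-- ===== SOURCE A (Python) =====
-- def update_hand(hand, word):
--     """
--     Does NOT assume that hand contains every letter in word at least as
--     many times as the letter appears in word. Letters in word that don't
--     appear in hand should be ignored. Letters that appear in word more times
--     than in hand should never result in a negative count; instead, set the
--     count in the returned hand to 0 (or remove the letter from the
--     dictionary, depending on how your code is structured).
--
--     Updates the hand: uses up the letters in the given word
--     and returns the new hand, without those letters in it.
--
--     Has no side effects: does not modify hand.
--
--     word: string
--     hand: dictionary (string -> int)
--     returns: dictionary (string -> int)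
--     """
--     word = word.lower()
--     new_hand = hand.copy()
--
--     for c in word:
--         if new_hand.get(c,-1) == 1:
--             del new_hand[c]
--         elif new_hand.get(c, -1) > 1:
--             new_hand[c] -= 1
--
--     return new_hand
-- ===== SOURCE B (Python) =====
-- def update_hand(hand, word):
--     # Build a frequency table of the lowercased word once, then update the
--     # copied hand in a single pass over the distinct letters.
--     need = {}
--     for c in word.lower():
--         need[c] = need.get(c, 0) + 1
--     new_hand = dict(hand)
--     for letter, k in need.items():
--         h = new_hand.get(letter, 0)
--         if h >= 1:
--             if h - k <= 0:
--                 del new_hand[letter]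
--             else:
--                 new_hand[letter] = h - k
--     return new_hand
-- ===== Notes on version B (the rewrite author's own statement) =====
-- stated objective: idiomatic
-- what changed: A walks the word character by character, decrementing or deleting the hand entry once per occurrence; B builds a frequency table of the lowercased word once and then does a single pass over its distinct letters, subtracting whole counts (delete when the count is used up).
import Mathlib
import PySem

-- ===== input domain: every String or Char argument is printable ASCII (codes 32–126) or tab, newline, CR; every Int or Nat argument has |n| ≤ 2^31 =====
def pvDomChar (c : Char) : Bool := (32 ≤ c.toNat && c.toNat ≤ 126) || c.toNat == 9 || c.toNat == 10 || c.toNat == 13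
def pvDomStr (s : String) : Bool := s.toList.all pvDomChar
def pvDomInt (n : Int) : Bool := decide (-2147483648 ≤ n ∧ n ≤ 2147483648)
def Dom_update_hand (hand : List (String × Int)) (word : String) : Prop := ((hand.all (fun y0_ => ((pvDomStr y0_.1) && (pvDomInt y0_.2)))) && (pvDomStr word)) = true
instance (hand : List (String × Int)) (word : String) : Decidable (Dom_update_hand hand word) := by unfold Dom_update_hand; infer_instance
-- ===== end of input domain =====

-- B replaces A's per-occurrence decrement/delete loop over the word's characters by a
-- frequency table of the word and one pass over its distinct letters (objective: idiomatic).

-- a character of the word used as a dict key (Python iterates a str as 1-char strings)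
def pvKey (c : Char) : String := String.ofList [c]

-- ===== PORT A =====
-- the body of A's 'for c in word' loop
def pvStepA (d : PySem.Dict String Int) (u : String) : PySem.Dict String Int :=
  if d.getD u (-1) = 1 then d.erase u
  else if d.getD u (-1) > 1 then d.insert u (d.getD u (-1) - 1)
  else d

def update_hand (hand : List (String × Int)) (word : String) : List (String × Int) :=
  ((PySem.Str.lower word).toList.foldl (fun d c => pvStepA d (pvKey c)) (PySem.Dict.mk hand)).items

-- ===== PORT B =====
-- the body of B's loop over the distinct (letter, count) pairs of the frequency table
def pvStepB (d : PySem.Dict String Int) (u : String) (k : Int) : PySem.Dict String Int :=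
  let h := d.getD u 0
  if 1 ≤ h then (if h - k ≤ 0 then d.erase u else d.insert u (h - k)) else d

def update_hand_alt (hand : List (String × Int)) (word : String) : List (String × Int) :=
  let need : PySem.Dict Char Int :=
    (PySem.Str.lower word).toList.foldl (fun d c => d.insert c (d.getD c 0 + 1)) PySem.Dict.empty
  (need.items.foldl (fun d p => pvStepB d (pvKey p.1) p.2) (PySem.Dict.mk hand)).items

-- ===== PRECONDITION & SPEC =====
def Spec_update_hand (hand : List (String × Int)) (word : String) (out : List (String × Int)) : Prop := out = update_hand_alt hand word
instance (hand : List (String × Int)) (word : String) (out : List (String × Int)) : Decidable (Spec_update_hand hand word out) := by unfold Spec_update_hand; infer_instance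

-- ===== CLAIM (what is proved, stated in full; the proofs are below) =====
def Claim_equal_update_hand : Prop := ∀ (hand : List (String × Int)) (word : String), Dom_update_hand hand word → Spec_update_hand hand word (update_hand hand word)

-- ===== LEMMAS AND PROOFS =====

-- helper lemmas about erase (not in the PySem lemma list)
def pvF (d : PySem.Dict String Int) (n : String → Int) (p : String × Int) : Option (String × Int) :=
  match d.get? p.1 with
  | none => some p
  | some v => if 1 ≤ v ∧ v ≤ n p.1 then none
              else if 1 ≤ v ∧ 1 ≤ n p.1 then some (p.1, v - n p.1)
              else some p

def pvSpecN (d : PySem.Dict String Int) (n : String → Int) : List (String × Int) :=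
  d.items.filterMap (pvF d n)

lemma pv_get?_erase (d : PySem.Dict String Int) (u k : String) :
    (d.erase u).get? k = if k = u then none else d.get? k := by
  obtain ⟨l⟩ := d
  simp only [PySem.Dict.erase, PySem.Dict.get?, List.find?_filter]
  by_cases hk : k = u
  · subst hk
    rw [List.find?_eq_none.mpr]
    · simp
    · intro a _
      simp only [decide_eq_true_eq, Bool.not_eq_true', beq_eq_false_iff_ne, ne_eq,
        beq_iff_eq, not_and]
      tauto
  · have hpred : (fun a : String × Int => decide ((!(a.1 == u)) = true ∧ (a.1 == k) = true))
        = (fun p : String × Int => p.1 == k) := by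
      funext a
      by_cases h : a.1 = k
      · subst h; simp [hk]
      · simp [h]
    simp only [hpred, hk, if_false]

lemma pv_mem_ne_of_get?_none (d : PySem.Dict String Int) (u : String)
    (g : d.get? u = none) : ∀ p ∈ d.items, p.1 ≠ u := by
  intro p hp
  simp only [PySem.Dict.get?, Option.map_eq_none_iff, List.find?_eq_none] at g
  intro h; exact absurd (by simp [h]) (g p hp)

lemma pvSpecN_congrF (d : PySem.Dict String Int) (m n : String → Int)
    (h : ∀ p ∈ d.items, pvF d m p = pvF d n p) : pvSpecN d m = pvSpecN d n :=
  List.filterMap_congr h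

lemma pvSpecN_zero (d : PySem.Dict String Int) (n : String → Int)
    (h : ∀ k, n k = 0) : pvSpecN d n = d.items := by
  unfold pvSpecN
  have : ∀ p ∈ d.items, pvF d n p = some p := by
    intro p _
    unfold pvF
    cases g : d.get? p.1 with
    | none => rfl
    | some v => simp [h p.1]; omega
  rw [List.filterMap_congr this, List.filterMap_some]

lemma pvL1 (d : PySem.Dict String Int) (n : String → Int) (u : String)
    (hn : ∀ k, 0 ≤ n k) :
    pvSpecN d (fun k => n k + if k = u then 1 else 0) = pvSpecN (pvStepA d u) n := by
  set m : String → Int := fun k => n k + if k = u then 1 else 0 with hm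
  have hmu : m u = n u + 1 := by simp [hm]
  have hmne : ∀ k, k ≠ u → m k = n k := by intro k hk; simp [hm, hk]
  cases g : d.get? u with
  | none =>
      have hd : pvStepA d u = d := by
        unfold pvStepA
        rw [PySem.Dict.getD_of_get?_eq_none d (-1) g]
        norm_num
      rw [hd]
      refine pvSpecN_congrF d m n ?_
      intro p hp
      unfold pvF
      rw [hmne p.1 (pv_mem_ne_of_get?_none d u g p hp)]
  | some v =>
      have hgd : d.getD u (-1) = v := PySem.Dict.getD_of_get?_eq_some d (-1) g
      by_cases h1 : v = 1
      · -- erase branch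
        have hd : pvStepA d u = d.erase u := by unfold pvStepA; rw [hgd, h1]; simp
        rw [hd]
        unfold pvSpecN
        have he : (d.erase u).items = d.items.filter (fun p => !(p.1 == u)) := rfl
        rw [he, List.filterMap_filter]
        refine List.filterMap_congr ?_
        intro p hp
        by_cases hpu : p.1 = u
        · have h1m : (1:Int) ≤ 1 ∧ (1:Int) ≤ m u := by
            refine ⟨le_refl _, ?_⟩; have := hn u; omega
          unfold pvF
          simp [hpu, g, h1, h1m]
        · have hb : (!(p.1 == u)) = true := by simp [hpu]
          rw [if_pos hb]
          unfold pvF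
          rw [pv_get?_erase, if_neg hpu]
          rw [hmne p.1 hpu]
      · by_cases h2 : v > 1
        · -- insert branch
          have hd : pvStepA d u = d.insert u (v - 1) := by
            unfold pvStepA; rw [hgd]; simp [h1, h2]
          rw [hd]
          unfold pvSpecN
          have hc : d.contains u = true := by
            rw [PySem.Dict.contains_eq_isSome_get?, g]; rfl
          rw [PySem.Dict.items_insert_of_contains d (v-1) hc, List.filterMap_map]
          refine List.filterMap_congr ?_
          intro p hp
          by_cases hpu : p.1 = u
          · have hb : (p.1 == u) = true := by simp [hpu]
            unfold pvF
            simp only [Function.comp_apply, hb, if_true]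
            rw [PySem.Dict.get?_insert_self d u (v-1)]
            simp only [hpu, g, hmu]
            have hnu := hn u
            split_ifs <;> first | rfl | omega | (simp only [Prod.mk.injEq, Option.some.injEq]; exact ⟨trivial, by omega⟩)
          · have hb : (p.1 == u) = false := by simp [hpu]
            unfold pvF
            simp only [Function.comp_apply, hb, Bool.false_eq_true, if_false]
            rw [PySem.Dict.get?_insert_of_ne d (v-1) hpu]
            simp only [hmne p.1 hpu]
        · -- unchanged branch
          have hd : pvStepA d u = d := by unfold pvStepA; rw [hgd]; simp [h1, h2]
          rw [hd]
          refine pvSpecN_congrF d m n ?_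
          intro p hp
          by_cases hpu : p.1 = u
          · unfold pvF
            simp only [hpu, g]
            have hv : ¬ (1:Int) ≤ v := by omega
            simp [hv]
          · unfold pvF
            rw [hmne p.1 hpu]

lemma pvL2 (d : PySem.Dict String Int) (n : String → Int) (u : String) (t : Int)
    (ht : 1 ≤ t) (h0 : n u = 0) :
    pvSpecN d (fun k => if k = u then t else n k) = pvSpecN (pvStepB d u t) n := by
  set m : String → Int := fun k => if k = u then t else n k with hm
  have hmu : m u = t := by simp [hm]
  have hmne : ∀ k, k ≠ u → m k = n k := by intro k hk; simp [hm, hk]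
  cases g : d.get? u with
  | none =>
      have hd : pvStepB d u t = d := by
        unfold pvStepB
        rw [PySem.Dict.getD_of_get?_eq_none d 0 g]
        norm_num
      rw [hd]
      refine pvSpecN_congrF d m n ?_
      intro p hp
      unfold pvF
      rw [hmne p.1 (pv_mem_ne_of_get?_none d u g p hp)]
  | some v =>
      have hgd : d.getD u 0 = v := PySem.Dict.getD_of_get?_eq_some d 0 g
      by_cases hv : 1 ≤ v
      · by_cases hvt : v - t ≤ 0
        · -- erase branch
          have hd : pvStepB d u t = d.erase u := by
            unfold pvStepB; rw [hgd]; simp [hv, hvt]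
          rw [hd]
          unfold pvSpecN
          have he : (d.erase u).items = d.items.filter (fun p => !(p.1 == u)) := rfl
          rw [he, List.filterMap_filter]
          refine List.filterMap_congr ?_
          intro p hp
          by_cases hpu : p.1 = u
          · have h1m : (1:Int) ≤ v ∧ v ≤ m u := by rw [hmu]; omega
            unfold pvF
            simp [hpu, g, h1m]
          · have hb : (!(p.1 == u)) = true := by simp [hpu]
            rw [if_pos hb]
            unfold pvF
            rw [pv_get?_erase, if_neg hpu]
            rw [hmne p.1 hpu]
        · -- insert branch
          have hd : pvStepB d u t = d.insert u (v - t) := by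
            unfold pvStepB; rw [hgd]; simp [hv, hvt]
          rw [hd]
          unfold pvSpecN
          have hc : d.contains u = true := by
            rw [PySem.Dict.contains_eq_isSome_get?, g]; rfl
          rw [PySem.Dict.items_insert_of_contains d (v-t) hc, List.filterMap_map]
          refine List.filterMap_congr ?_
          intro p hp
          by_cases hpu : p.1 = u
          · have hb : (p.1 == u) = true := by simp [hpu]
            unfold pvF
            simp only [Function.comp_apply, hb, if_true]
            rw [PySem.Dict.get?_insert_self d u (v-t)]
            simp only [hpu, g, hmu, h0]
            split_ifs <;> first | rfl | omega
          · have hb : (p.1 == u) = false := by simp [hpu]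
            unfold pvF
            simp only [Function.comp_apply, hb, Bool.false_eq_true, if_false]
            rw [PySem.Dict.get?_insert_of_ne d (v-t) hpu]
            simp only [hmne p.1 hpu]
      · -- unchanged branch
        have hd : pvStepB d u t = d := by unfold pvStepB; rw [hgd]; simp [hv]
        rw [hd]
        refine pvSpecN_congrF d m n ?_
        intro p hp
        by_cases hpu : p.1 = u
        · unfold pvF
          simp only [hpu, g]
          simp [hv]
        · unfold pvF
          rw [hmne p.1 hpu]

def pvNOf (l : List (Char × Int)) (k : String) : Int :=
  match l.find? (fun p => pvKey p.1 == k) with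
  | some p => p.2
  | none => 0

lemma pvFoldA (ws : List Char) (d : PySem.Dict String Int) :
    (ws.foldl (fun d c => pvStepA d (pvKey c)) d).items
      = pvSpecN d (fun k => ((ws.map pvKey).count k : Int)) := by
  induction ws generalizing d with
  | nil => simp [pvSpecN_zero d _ (fun k => rfl)]
  | cons c ws ih =>
      rw [List.foldl_cons, ih]
      have hfun : (fun k => (((c :: ws).map pvKey).count k : Int))
          = fun k => ((ws.map pvKey).count k : Int) + if k = pvKey c then 1 else 0 := by
        funext k
        simp only [List.map_cons, List.count_cons, beq_iff_eq]
        by_cases hk : k = pvKey c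
        · simp [hk]
        · simp [hk]
          exact fun h => hk h.symm
      rw [hfun, pvL1 d _ (pvKey c) (fun k => Int.natCast_nonneg _)]

lemma pvFoldB (l : List (Char × Int)) (d : PySem.Dict String Int)
    (hnd : (l.map (fun p => pvKey p.1)).Nodup) (hpos : ∀ p ∈ l, 1 ≤ p.2) :
    (l.foldl (fun d p => pvStepB d (pvKey p.1) p.2) d).items = pvSpecN d (pvNOf l) := by
  induction l generalizing d with
  | nil =>
      rw [List.foldl_nil]
      exact (pvSpecN_zero d (pvNOf []) (fun k => rfl)).symm
  | cons q l ih =>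
      rw [List.foldl_cons,
        ih _ (List.Nodup.of_cons hnd) (fun p hp => hpos p (List.mem_cons_of_mem q hp))]
      have h0 : pvNOf l (pvKey q.1) = 0 := by
        unfold pvNOf
        rw [List.find?_eq_none.mpr]
        intro p hp
        simp only [beq_iff_eq]
        intro hcontra
        exact (List.nodup_cons.mp hnd).1
          (by simpa [← hcontra] using List.mem_map_of_mem (f := fun p => pvKey p.1) hp)
      have hfun : pvNOf (q :: l) = fun k => if k = pvKey q.1 then q.2 else pvNOf l k := by
        funext k
        unfold pvNOf
        rw [List.find?_cons]
        by_cases hk : k = pvKey q.1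
        · simp [hk]
        · have : (pvKey q.1 == k) = false := by simp; exact fun h => hk h.symm
          simp [this, hk]
      rw [hfun, pvL2 d (pvNOf l) (pvKey q.1) q.2 (hpos q (List.mem_cons_self)) h0]

lemma pvKey_inj : Function.Injective pvKey := by
  intro a b h
  simpa [pvKey] using congrArg String.toList h

lemma pvNOf_counter (ws : List Char) (k : String) :
    pvNOf ((PySem.Set.ofList ws).map (fun u => (u, (ws.count u : Int)))) k
      = ((ws.map pvKey).count k : Int) := by
  unfold pvNOf
  rw [List.find?_map]
  cases hf : (PySem.Set.ofList ws).find? ((fun p : Char × Int => pvKey p.1 == k) ∘ (fun u => (u, (ws.count u : Int)))) with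
  | none =>
      simp only [Option.map_none]
      rw [List.find?_eq_none] at hf
      have hk : k ∉ ws.map pvKey := by
        rintro hmem
        obtain ⟨c, hc, rfl⟩ := List.mem_map.mp hmem
        exact absurd (by simp) (hf c ((PySem.Set.mem_ofList ws c).mpr hc))
      rw [List.count_eq_zero.mpr hk]
      rfl
  | some u =>
      have hku : pvKey u = k := by
        have := List.find?_some hf
        simpa using this
      have hu : u ∈ ws := (PySem.Set.mem_ofList ws u).mp (List.mem_of_find?_eq_some hf)
      simp only [Option.map_some]
      rw [← hku, List.count_map_of_injective ws pvKey pvKey_inj u]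

theorem pv_main (hand : List (String × Int)) (word : String) :
    ((PySem.Str.lower word).toList.foldl (fun d c => pvStepA d (pvKey c)) (PySem.Dict.mk hand)).items
      = (((PySem.Str.lower word).toList.foldl (fun d c => d.insert c (d.getD c 0 + 1)) PySem.Dict.empty).items.foldl
          (fun d p => pvStepB d (pvKey p.1) p.2) (PySem.Dict.mk hand)).items := by
  set ws := (PySem.Str.lower word).toList with hws
  rw [pvFoldA, PySem.Dict.foldl_insert_getD_add_one_eq_counter, PySem.Dict.items_counter]
  rw [pvFoldB]
  · refine (congrArg (pvSpecN (PySem.Dict.mk hand)) ?_).symm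
    funext k
    exact pvNOf_counter ws k
  · rw [List.map_map]
    exact List.Nodup.map pvKey_inj (PySem.Set.nodup_ofList ws)
  · intro p hp
    obtain ⟨c, hc, rfl⟩ := List.mem_map.mp hp
    have : 1 ≤ ws.count c := List.count_pos_iff.mpr ((PySem.Set.mem_ofList ws c).mp hc)
    show (1 : Int) ≤ (ws.count c : Int)
    exact_mod_cast this

-- ===== VERDICT (by name: the statement is the Claim_ definition above) =====
theorem update_hand_spec : Claim_equal_update_hand := by
  intro hand word _
  unfold Spec_update_hand update_hand update_hand_alt
  exact pv_main hand word
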